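-- pv_equiv track=rewrite | github.com/yotti5160/Codility | Lessons/7-04_StoneWall.py | solution
-- ===== SOURCE A (Python) =====
-- def solution(H):
--     hi=[]
--     count=0
--     for h in H:
--         if not hi:
--             hi.append(h)
--             count+=1
--         else:
--             while hi and hi[-1]>h:
--                 hi.pop()
--             if hi and hi[-1]==h:
--                 pass
--             else:
--                 hi.append(h)
--                 count+=1
--     return count
-- ===== SOURCE B (Python) =====
-- def solution(H):
--     count = 0
--     for i, h in enumerate(H):
--         j = i - 1
--         reused = False
--         while j >= 0 and H[j] >= h:
--             if H[j] == h:
--                 reused = True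
--                 break
--             j -= 1
--         if not reused:
--             count += 1
--     return count
-- ===== Notes on version B (the rewrite author's own statement) =====
-- stated objective: alternative
-- what changed: Replaced the explicit pop-stack with a stack-free per-position backward scan: a block is reused exactly when some earlier equal height is reachable without dipping below it, so B counts positions where that scan fails.
import Mathlib
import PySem

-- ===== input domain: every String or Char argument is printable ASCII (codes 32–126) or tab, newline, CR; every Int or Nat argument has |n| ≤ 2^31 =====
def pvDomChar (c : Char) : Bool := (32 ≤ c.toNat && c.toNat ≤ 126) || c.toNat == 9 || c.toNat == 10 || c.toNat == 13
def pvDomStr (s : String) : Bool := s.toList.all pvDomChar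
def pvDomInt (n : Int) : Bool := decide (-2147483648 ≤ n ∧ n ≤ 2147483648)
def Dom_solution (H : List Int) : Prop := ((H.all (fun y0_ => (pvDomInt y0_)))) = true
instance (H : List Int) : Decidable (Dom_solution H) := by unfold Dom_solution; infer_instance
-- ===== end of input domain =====

-- B replaces A's pop-stack with a stack-free per-position backward scan (alternative algorithm, same values).

-- ===== PORT A =====
-- Python list `hi` with append/pop at the END is encoded head-first (list head = Python's hi[-1]).
-- the `while hi and hi[-1] > h: hi.pop()` loop
def pyPopWhileGt (h : Int) : List Int → List Int
  | [] => []
  | t :: rest => if t > h then pyPopWhileGt h rest else t :: rest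

-- one iteration of A's `for h in H` loop over the state (hi, count)
def solutionStep (st : List Int × Int) (h : Int) : List Int × Int :=
  if st.1 = [] then (h :: st.1, st.2 + 1)
  else
    match pyPopWhileGt h st.1 with
    | t :: rest => if t = h then (t :: rest, st.2) else (h :: t :: rest, st.2 + 1)
    | [] => ([h], st.2 + 1)

def solution (H : List Int) : Int := (H.foldl solutionStep ([], 0)).2

-- ===== PORT B =====
-- the backward `while j >= 0 and H[j] >= h` scan; `pre` is the prefix H[0:i] newest-first (j descending)
def scanBack (h : Int) : List Int → Bool
  | [] => false
  | y :: ys => if y ≥ h then (if y = h then true else scanBack h ys) else false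

def altGo (pre : List Int) (rest : List Int) (count : Int) : Int :=
  match rest with
  | [] => count
  | h :: tl => altGo (h :: pre) tl (if scanBack h pre then count else count + 1)

def solution_alt (H : List Int) : Int := altGo [] H 0

-- ===== PRECONDITION & SPEC =====
def Spec_solution (H : List Int) (out : Int) : Prop := out = solution_alt H
instance (H : List Int) (out : Int) : Decidable (Spec_solution H out) := by unfold Spec_solution; infer_instance

-- ===== CLAIM (what is proved, stated in full; the proofs are below) =====
def Claim_equal_solution : Prop := ∀ (H : List Int), Dom_solution H → Spec_solution H (solution H)

-- ===== LEMMAS AND PROOFS =====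

-- proof-only model of A's stack after processing a prefix (prefix given newest-first)
def dropGe (y : Int) (s : List Int) : List Int :=
  match pyPopWhileGt y s with
  | t :: rest => if t = y then rest else t :: rest
  | [] => []

def stackOf : List Int → List Int
  | [] => []
  | y :: ys => y :: dropGe y (stackOf ys)

def topEq (h : Int) (s : List Int) : Bool := (pyPopWhileGt h s).head? == some h

theorem stepMatch (l : List Int) (c h : Int) :
    (match l with
      | t :: rest => if t = h then (t :: rest, c) else (h :: t :: rest, c + 1)
      | [] => ([h], c + 1)) =
    ((if l.head? == some h then l else h :: l),
     (if l.head? == some h then c else c + 1)) := by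
  cases l with
  | nil => simp
  | cons u us => by_cases hu : u = h <;> simp [hu]

theorem solutionStep_eq (s : List Int) (c h : Int) :
    solutionStep (s, c) h =
      ((if topEq h s then pyPopWhileGt h s else h :: pyPopWhileGt h s),
       (if topEq h s then c else c + 1)) := by
  cases s with
  | nil => simp [solutionStep, topEq, pyPopWhileGt]
  | cons t rest =>
    simp only [solutionStep, topEq, if_neg (by simp : ¬ (t :: rest : List Int) = [])]
    exact stepMatch (pyPopWhileGt h (t :: rest)) c h

theorem stack_update (s : List Int) (h : Int) :
    (if topEq h s then pyPopWhileGt h s else h :: pyPopWhileGt h s) = h :: dropGe h s := by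
  unfold topEq dropGe
  cases hp : pyPopWhileGt h s with
  | nil => simp
  | cons u us => by_cases hu : u = h <;> simp [hu]

theorem pop_pop (h y : Int) (hy : h < y) (s : List Int) :
    pyPopWhileGt h (pyPopWhileGt y s) = pyPopWhileGt h s := by
  induction s with
  | nil => rfl
  | cons t rest ih =>
    by_cases ht : t > y
    · have : t > h := by omega
      simp [pyPopWhileGt, ht, this, ih]
    · simp [pyPopWhileGt, ht]

theorem pop_dropGe (h y : Int) (hy : h < y) (s : List Int) :
    pyPopWhileGt h (dropGe y s) = pyPopWhileGt h s := by
  rw [← pop_pop h y hy s]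
  unfold dropGe
  cases hp : pyPopWhileGt y s with
  | nil => rfl
  | cons u us =>
    by_cases hu : u = y
    · subst hu; simp [pyPopWhileGt, hy]
    · simp [hu]

-- the crux: A's "top equals h after popping" test on the stack of a prefix
-- coincides with B's backward scan over that prefix
theorem topEq_stackOf (h : Int) (pre : List Int) :
    topEq h (stackOf pre) = scanBack h pre := by
  induction pre with
  | nil => rfl
  | cons y ys ih =>
    simp only [stackOf, scanBack]
    rcases lt_trichotomy y h with hlt | heq | hgt
    · have h1 : ¬ y ≥ h := by omega
      have h2 : ¬ y > h := by omega
      simp [topEq, pyPopWhileGt, h1, h2]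
      omega
    · subst heq
      simp [topEq, pyPopWhileGt]
    · have h1 : y ≥ h := by omega
      have h2 : y > h := by omega
      simp only [topEq, pyPopWhileGt, if_pos h2]
      rw [pop_dropGe h y h2]
      simp only [if_pos h1, if_neg (by omega : ¬ y = h)]
      exact ih

theorem main_inv (rest pre : List Int) (c : Int) :
    (rest.foldl solutionStep (stackOf pre, c)).2 = altGo pre rest c := by
  induction rest generalizing pre c with
  | nil => rfl
  | cons h tl ih =>
    simp only [List.foldl_cons, altGo]
    rw [solutionStep_eq, stack_update, topEq_stackOf]
    have := ih (h :: pre) (if scanBack h pre then c else c + 1)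
    simpa only [stackOf] using this

-- ===== VERDICT (by name: the statement is the Claim_ definition above) =====
theorem solution_spec : Claim_equal_solution := by
  intro H _
  unfold Spec_solution solution solution_alt
  simpa using main_inv H [] 0
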